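-- pv_equiv track=rewrite | github.com/valscope-sys/telegram-briefing-bot | telegram_bot/issue_bot/collectors/sec_collector.py | _pick_item_priority
-- ===== SOURCE A (Python) =====
-- SEC_ITEM_RULES = {
--     "2.02": ("HIGH", "분기/연간 실적(Results of Operations)"),
--     # 아래는 모두 SKIP (빅테크 메인 관심사는 실적)
--     "1.01": ("SKIP", "중대계약 체결"),
--     "1.02": ("SKIP", "중대계약 종료"),
--     "1.03": ("SKIP", "파산·법정관리"),
--     "2.01": ("SKIP", "인수·처분 완료"),
--     "2.03": ("SKIP", "중대 재무 채무"),
--     "2.04": ("SKIP", "중대 재무 의무 발동"),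
--     "2.05": ("SKIP", "사업구조조정·Exit"),
--     "2.06": ("SKIP", "중대 자산손상"),
--     "3.01": ("SKIP", "상장폐지 예고"),
--     "3.02": ("SKIP", "비공개 증권 발행"),
--     "3.03": ("SKIP", "증권권리 변경"),
--     "4.01": ("SKIP", "감사인 교체"),
--     "4.02": ("SKIP", "재무 비신뢰"),
--     "5.01": ("SKIP", "경영권 변경"),
--     "5.02": ("SKIP", "임원 변경"),
--     "5.03": ("SKIP", "정관 개정"),
--     "5.04": ("SKIP", "임원보상계획"),
--     "5.05": ("SKIP", "윤리강령"),
--     "5.07": ("SKIP", "주주총회 결과"),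
--     "5.08": ("SKIP", "주주제안"),
--     "7.01": ("SKIP", "Regulation FD 공시"),
--     "8.01": ("SKIP", "기타 사건"),
--     "9.01": ("SKIP", "재무제표/Exhibit"),
-- }
--
-- _PRIORITY_RANK = {"URGENT": 4, "HIGH": 3, "NORMAL": 2, "SKIP": 1}
--
-- def _pick_item_priority(items: list) -> tuple:
--     """Items 리스트에서 가장 높은 우선순위 + 라벨 선정.
--
--     Returns:
--         (priority, label, matched_item) — 매칭 없으면 (None, "", "")
--     """
--     if not items:
--         return (None, "", "")
--
--     best_priority = None
--     best_label = ""
--     best_item = ""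
--     best_rank = 0
--
--     for item in items:
--         rule = SEC_ITEM_RULES.get(item)
--         if not rule:
--             continue
--         pri, label = rule
--         rank = _PRIORITY_RANK.get(pri, 0)
--         if rank > best_rank:
--             best_rank = rank
--             best_priority = pri
--             best_label = label
--             best_item = item
--
--     return (best_priority, best_label, best_item)
-- ===== SOURCE B (Python) =====
-- SEC_ITEM_RULES = {
--     "2.02": ("HIGH", "분기/연간 실적(Results of Operations)"),
--     "1.01": ("SKIP", "중대계약 체결"),
--     "1.02": ("SKIP", "중대계약 종료"),
--     "1.03": ("SKIP", "파산·법정관리"),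
--     "2.01": ("SKIP", "인수·처분 완료"),
--     "2.03": ("SKIP", "중대 재무 채무"),
--     "2.04": ("SKIP", "중대 재무 의무 발동"),
--     "2.05": ("SKIP", "사업구조조정·Exit"),
--     "2.06": ("SKIP", "중대 자산손상"),
--     "3.01": ("SKIP", "상장폐지 예고"),
--     "3.02": ("SKIP", "비공개 증권 발행"),
--     "3.03": ("SKIP", "증권권리 변경"),
--     "4.01": ("SKIP", "감사인 교체"),
--     "4.02": ("SKIP", "재무 비신뢰"),
--     "5.01": ("SKIP", "경영권 변경"),
--     "5.02": ("SKIP", "임원 변경"),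
--     "5.03": ("SKIP", "정관 개정"),
--     "5.04": ("SKIP", "임원보상계획"),
--     "5.05": ("SKIP", "윤리강령"),
--     "5.07": ("SKIP", "주주총회 결과"),
--     "5.08": ("SKIP", "주주제안"),
--     "7.01": ("SKIP", "Regulation FD 공시"),
--     "8.01": ("SKIP", "기타 사건"),
--     "9.01": ("SKIP", "재무제표/Exhibit"),
-- }
--
--
-- def _pick_item_priority(items: list) -> tuple:
--     """Tiered scan: try each priority level from highest to lowest and
--     return the first item (in original order) matching that level."""
--     for pri in ("URGENT", "HIGH", "NORMAL", "SKIP"):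
--         for item in items:
--             rule = SEC_ITEM_RULES.get(item)
--             if rule is not None and rule[0] == pri:
--                 return (pri, rule[1], item)
--     return (None, "", "")
-- ===== Notes on version B (the rewrite author's own statement) =====
-- stated objective: alternative
-- what changed: Replaces the single max-rank-tracking fold with tiered scans: for each priority level in descending order, return the first item whose rule has that priority, short-circuiting at the highest populated tier.
import Mathlib
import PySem

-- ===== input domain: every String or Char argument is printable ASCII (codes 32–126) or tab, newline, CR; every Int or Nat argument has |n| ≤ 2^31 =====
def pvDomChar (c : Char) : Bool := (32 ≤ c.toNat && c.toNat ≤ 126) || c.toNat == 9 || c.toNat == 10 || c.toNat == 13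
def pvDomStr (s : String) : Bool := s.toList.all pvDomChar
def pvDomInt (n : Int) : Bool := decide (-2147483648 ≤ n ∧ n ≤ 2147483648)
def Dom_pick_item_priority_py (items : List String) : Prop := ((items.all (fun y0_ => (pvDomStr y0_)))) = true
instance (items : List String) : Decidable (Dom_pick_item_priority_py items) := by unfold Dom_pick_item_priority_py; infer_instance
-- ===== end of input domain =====

-- B replaces A's single max-rank-tracking pass with per-priority-tier scans (alternative decomposition, same cost).

-- ===== PORT A =====
def secItemRules : PySem.Dict String (String × String) := PySem.Dict.mk [
  ("2.02", ("HIGH", "분기/연간 실적(Results of Operations)")),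
  ("1.01", ("SKIP", "중대계약 체결")),
  ("1.02", ("SKIP", "중대계약 종료")),
  ("1.03", ("SKIP", "파산·법정관리")),
  ("2.01", ("SKIP", "인수·처분 완료")),
  ("2.03", ("SKIP", "중대 재무 채무")),
  ("2.04", ("SKIP", "중대 재무 의무 발동")),
  ("2.05", ("SKIP", "사업구조조정·Exit")),
  ("2.06", ("SKIP", "중대 자산손상")),
  ("3.01", ("SKIP", "상장폐지 예고")),
  ("3.02", ("SKIP", "비공개 증권 발행")),
  ("3.03", ("SKIP", "증권권리 변경")),
  ("4.01", ("SKIP", "감사인 교체")),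
  ("4.02", ("SKIP", "재무 비신뢰")),
  ("5.01", ("SKIP", "경영권 변경")),
  ("5.02", ("SKIP", "임원 변경")),
  ("5.03", ("SKIP", "정관 개정")),
  ("5.04", ("SKIP", "임원보상계획")),
  ("5.05", ("SKIP", "윤리강령")),
  ("5.07", ("SKIP", "주주총회 결과")),
  ("5.08", ("SKIP", "주주제안")),
  ("7.01", ("SKIP", "Regulation FD 공시")),
  ("8.01", ("SKIP", "기타 사건")),
  ("9.01", ("SKIP", "재무제표/Exhibit"))]

def priorityRank : PySem.Dict String Int := PySem.Dict.mk
  [("URGENT", 4), ("HIGH", 3), ("NORMAL", 2), ("SKIP", 1)]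

-- one loop iteration of A (rule = None → continue; else compare rank with best_rank)
def pickStep (st : Option String × String × String × Int) (item : String) :
    Option String × String × String × Int :=
  match secItemRules.get? item with
  | none => st
  | some (pri, label) =>
      let rank := priorityRank.getD pri 0
      if rank > st.2.2.2 then (some pri, label, item, rank) else st

def pick_item_priority_py (items : List String) : Option String × String × String :=
  if items = [] then (none, "", "")
  else
    let st := items.foldl pickStep (none, "", "", (0 : Int))
    (st.1, st.2.1, st.2.2.1)

-- ===== PORT B =====
-- inner loop: first item (original order) whose rule's priority equals pri
def altScan (items : List String) (pri : String) : Option (Option String × String × String) :=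
  match items with
  | [] => none
  | item :: rest =>
      match secItemRules.get? item with
      | some rule => if rule.1 == pri then some (some pri, rule.2, item) else altScan rest pri
      | none => altScan rest pri

-- outer loop over the priority tiers
def altTiers (items : List String) : List String → Option (Option String × String × String)
  | [] => none
  | pri :: ps =>
      match altScan items pri with
      | some r => some r
      | none => altTiers items ps

def pick_item_priority_py_alt (items : List String) : Option String × String × String :=
  (altTiers items ["URGENT", "HIGH", "NORMAL", "SKIP"]).getD (none, "", "")

-- ===== PRECONDITION & SPEC =====
def Spec_pick_item_priority_py (items : List String) (out : Option String × String × String) : Prop := out = pick_item_priority_py_alt items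
instance (items : List String) (out : Option String × String × String) : Decidable (Spec_pick_item_priority_py items out) := by unfold Spec_pick_item_priority_py; infer_instance

-- ===== CLAIM (what is proved, stated in full; the proofs are below) =====
def Claim_equal_pick_item_priority_py : Prop := ∀ (items : List String), Dom_pick_item_priority_py items → Spec_pick_item_priority_py items (pick_item_priority_py items)

-- ===== LEMMAS AND PROOFS =====

-- every rule in the table has priority "HIGH" or "SKIP"
theorem rules_fst (s : String) (r : String × String)
    (h : secItemRules.get? s = some r) : r.1 = "HIGH" ∨ r.1 = "SKIP" := by
  have hm := PySem.Dict.mem_items_of_get?_eq_some secItemRules h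
  have hall : ∀ p ∈ secItemRules.items, p.2.1 = "HIGH" ∨ p.2.1 = "SKIP" := by decide
  simpa using hall (s, r) hm

theorem rank_high : priorityRank.getD "HIGH" (0 : Int) = 3 := by decide
theorem rank_skip : priorityRank.getD "SKIP" (0 : Int) = 1 := by decide

-- tiers with no rule entries never match
theorem altScan_urgent (items : List String) : altScan items "URGENT" = none := by
  induction items with
  | nil => rfl
  | cons item rest ih =>
      cases hr : secItemRules.get? item with
      | none => simp [altScan, hr, ih]
      | some r =>
          rcases rules_fst item r hr with h1 | h1 <;> simp [altScan, hr, h1, ih]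

theorem altScan_normal (items : List String) : altScan items "NORMAL" = none := by
  induction items with
  | nil => rfl
  | cons item rest ih =>
      cases hr : secItemRules.get? item with
      | none => simp [altScan, hr, ih]
      | some r =>
          rcases rules_fst item r hr with h1 | h1 <;> simp [altScan, hr, h1, ih]

-- once A holds a rank-3 best, nothing changes it
theorem fold_absorb (items : List String) (bp : Option String) (bl bi : String) :
    items.foldl pickStep (bp, bl, bi, (3 : Int)) = (bp, bl, bi, 3) := by
  induction items with
  | nil => rfl
  | cons item rest ih =>
      cases hr : secItemRules.get? item with
      | none => simp [List.foldl_cons, pickStep, hr, ih]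
      | some r =>
          obtain ⟨p, l⟩ := r
          rcases rules_fst item (p, l) hr with h1 | h1 <;> subst h1 <;>
            simp [List.foldl_cons, pickStep, hr, rank_high, rank_skip, ih]

-- from a rank-1 best, only a HIGH item changes the state
theorem fold_skip (items : List String) (bp : Option String) (bl bi : String) :
    items.foldl pickStep (bp, bl, bi, (1 : Int)) =
      match altScan items "HIGH" with
      | some (p, l, i) => (p, l, i, 3)
      | none => (bp, bl, bi, 1) := by
  induction items with
  | nil => rfl
  | cons item rest ih =>
      cases hr : secItemRules.get? item with
      | none => simp [List.foldl_cons, pickStep, hr, altScan, ih]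
      | some r =>
          obtain ⟨p, l⟩ := r
          rcases rules_fst item (p, l) hr with h1 | h1 <;> subst h1 <;>
            simp [List.foldl_cons, pickStep, hr, rank_high, rank_skip, altScan,
              ih, fold_absorb]

-- characterization of A's fold from the initial state via B's tier scans
theorem fold_main (items : List String) :
    items.foldl pickStep (none, "", "", (0 : Int)) =
      match altScan items "HIGH" with
      | some (p, l, i) => (p, l, i, 3)
      | none =>
          match altScan items "SKIP" with
          | some (p, l, i) => (p, l, i, 1)
          | none => (none, "", "", 0) := by
  induction items with
  | nil => rfl
  | cons item rest ih =>
      cases hr : secItemRules.get? item with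
      | none => simp [List.foldl_cons, pickStep, hr, altScan, ih]
      | some r =>
          obtain ⟨p, l⟩ := r
          rcases rules_fst item (p, l) hr with h1 | h1 <;> subst h1
          · simp [List.foldl_cons, pickStep, hr, rank_high, altScan, fold_absorb]
          · have hstep : List.foldl pickStep (none, "", "", (0 : Int)) (item :: rest)
                = List.foldl pickStep (some "SKIP", l, item, (1 : Int)) rest := by
              simp [List.foldl_cons, pickStep, hr, rank_skip]
            rw [hstep, fold_skip]
            cases hh : altScan rest "HIGH" with
            | none => simp [altScan, hr, hh]
            | some r' => simp [altScan, hr, hh]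

-- ===== VERDICT (by name: the statement is the Claim_ definition above) =====
theorem pick_item_priority_py_spec : Claim_equal_pick_item_priority_py := by
  intro items _
  unfold Spec_pick_item_priority_py pick_item_priority_py pick_item_priority_py_alt
  simp only [altTiers, altScan_urgent, altScan_normal]
  by_cases hnil : items = []
  · subst hnil; rfl
  · simp only [if_neg hnil, fold_main]
    cases hh : altScan items "HIGH" with
    | some r => rfl
    | none =>
        cases hs : altScan items "SKIP" with
        | some r => rfl
        | none => rfl
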